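-- pv_equiv track=rewrite | github.com/Bauumm/OpenHexagonLevelConverter | base_file.py | _get_pos_from_line
-- ===== SOURCE A (Python) =====
-- def _get_pos_from_line(line, text):
--     pos = 0
--     lines = text.split("\n")
--     if line < 0:
--         line = len(lines) + line + 1
--     for i in range(len(lines)):
--         if line == i:
--             break
--         pos += len(lines[i]) + 1
--     return pos
-- ===== SOURCE B (Python) =====
-- def _get_pos_from_line(line, text):
--     # closed-form: offset = length of the joined prefix of lines, +1 for its trailing newline
--     lines = text.split("\n")
--     if line < 0:
--         line = len(lines) + line + 1
--     k = line if 0 <= line < len(lines) else len(lines)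
--     return len("\n".join(lines[:k])) + 1 if k else 0
-- ===== Notes on version B (the rewrite author's own statement) =====
-- stated objective: alternative
-- what changed: Replaces A's scan-until-break accumulator loop over the lines with a closed-form computation: clamp the (negative-adjusted) line index, then the offset is len('\n'.join(lines[:k])) + 1 (or 0 for k=0), with no per-line accumulation loop.
import Mathlib
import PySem

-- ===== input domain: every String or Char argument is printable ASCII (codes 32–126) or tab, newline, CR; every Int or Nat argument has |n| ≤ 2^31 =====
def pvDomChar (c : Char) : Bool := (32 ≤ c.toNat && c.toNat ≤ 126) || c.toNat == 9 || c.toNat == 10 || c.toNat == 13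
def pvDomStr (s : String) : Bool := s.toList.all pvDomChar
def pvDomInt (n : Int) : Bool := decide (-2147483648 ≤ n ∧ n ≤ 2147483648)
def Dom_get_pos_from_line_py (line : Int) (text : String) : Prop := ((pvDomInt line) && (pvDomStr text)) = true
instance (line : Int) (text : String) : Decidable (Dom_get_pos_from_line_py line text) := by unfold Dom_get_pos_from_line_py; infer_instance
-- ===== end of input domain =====

-- B replaces A's scan-until-break accumulator loop with a closed-form join-length computation (objective: alternative).

-- ===== PORT A =====
-- the 'for i in range(len(lines)): if line == i: break; pos += len(lines[i]) + 1' loop, step for step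
def pvALoop (line : Int) (ls : List String) (i : Nat) (pos : Int) : Int :=
  match ls with
  | [] => pos
  | l :: rest => if line = (i : Int) then pos else pvALoop line rest (i + 1) (pos + PySem.Str.len l + 1)

def get_pos_from_line_py (line : Int) (text : String) : Int :=
  let lines := (PySem.Str.split? text "\n").getD []   -- sep ≠ "", so split? is some
  let line' := if line < 0 then (lines.length : Int) + line + 1 else line
  pvALoop line' lines 0 0

-- ===== PORT B =====
def get_pos_from_line_py_alt (line : Int) (text : String) : Int :=
  let lines := (PySem.Str.split? text "\n").getD []   -- sep ≠ "", so split? is some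
  let line' := if line < 0 then (lines.length : Int) + line + 1 else line
  let k : Nat := if 0 ≤ line' ∧ line' < (lines.length : Int) then line'.toNat else lines.length
  if k ≠ 0 then PySem.Str.len (PySem.Str.join "\n" (PySem.List.slice lines none (some (k : Int)))) + 1 else 0

-- ===== PRECONDITION & SPEC =====
def Spec_get_pos_from_line_py (line : Int) (text : String) (out : Int) : Prop := out = get_pos_from_line_py_alt line text
instance (line : Int) (text : String) (out : Int) : Decidable (Spec_get_pos_from_line_py line text out) := by unfold Spec_get_pos_from_line_py; infer_instance

-- ===== CLAIM =====
def Claim_equal_get_pos_from_line_py : Prop := ∀ (line : Int) (text : String), Dom_get_pos_from_line_py line text → Spec_get_pos_from_line_py line text (get_pos_from_line_py line text)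

-- ===== LEMMAS AND PROOFS =====
-- C ls = Σ (len l + 1), the quantity A's loop accumulates per consumed line
def pvC (ls : List String) : Int := (ls.map (fun l => PySem.Str.len l + 1)).sum

theorem pvC_nil : pvC [] = 0 := rfl
theorem pvC_cons (l : String) (rest : List String) : pvC (l :: rest) = PySem.Str.len l + 1 + pvC rest := by
  simp [pvC]

-- the break-loop computes pos + C of the prefix it actually consumes
theorem pvALoop_eq (line : Int) : ∀ (ls : List String) (i : Nat) (pos : Int),
    pvALoop line ls i pos =
      pos + pvC (ls.take (if line < (i : Int) then ls.length else min (line - i).toNat ls.length)) := by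
  intro ls
  induction ls with
  | nil => intro i pos; simp [pvALoop, pvC]
  | cons l rest ih =>
    intro i pos
    by_cases h : line = (i : Int)
    · subst h
      simp [pvALoop, pvC]
    · rw [pvALoop, if_neg h, ih (i + 1)]
      by_cases hlt : line < (i : Int)
      · have hlt' : line < ((i : Nat) + 1 : Int) := by omega
        simp only [if_pos hlt]
        rw [if_pos (by push_cast; omega)]
        simp [List.take_length, pvC_cons]
        ring
      · -- line > i
        have hgt : (i : Int) < line := by omega
        simp only [if_neg hlt]
        rw [if_neg (by push_cast; omega)]
        have h1 : min (line - i).toNat (rest.length + 1) = min (line - (i + 1)).toNat rest.length + 1 := by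
          omega
        have h2 : (line - ((i + 1 : Nat) : Int)).toNat = (line - (i:Int) - 1).toNat := by omega
        simp only [List.length_cons, h1, List.take_succ_cons, pvC_cons, h2]
        ring_nf

-- length of a "\n"-join of a nonempty list of lines, in terms of pvC
theorem pvJoin_len : ∀ (ls : List String), ls ≠ [] →
    PySem.Str.len (PySem.Str.join "\n" ls) = pvC ls - 1 := by
  intro ls
  induction ls with
  | nil => intro h; exact absurd rfl h
  | cons l rest ih =>
    intro _
    cases rest with
    | nil =>
      rw [PySem.Str.len_eq, PySem.Str.toList_join]
      simp [PySem.Chars.join_singleton, pvC_cons, pvC_nil, PySem.Str.len_eq]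
    | cons q rest' =>
      have hlen : (PySem.Str.join "\n" (l :: q :: rest')).toList.length
          = l.toList.length + 1 + (PySem.Str.join "\n" (q :: rest')).toList.length := by
        simp [PySem.Str.toList_join, PySem.Chars.join_cons_cons]
        omega
      have hrec := ih (by simp)
      rw [PySem.Str.len_eq] at hrec
      rw [PySem.Str.len_eq, hlen, pvC_cons, PySem.Str.len_eq]
      push_cast
      linarith [hrec]

-- ===== VERDICT =====
theorem get_pos_from_line_py_spec : Claim_equal_get_pos_from_line_py := by
  intro line text _
  unfold Spec_get_pos_from_line_py get_pos_from_line_py get_pos_from_line_py_alt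
  simp only []
  generalize (PySem.Str.split? text "\n").getD [] = lines
  generalize hline' : (if line < 0 then ((lines.length : Int) + line + 1) else line) = line'
  set k : Nat := if 0 ≤ line' ∧ line' < (lines.length : Int) then line'.toNat else lines.length with hk
  rw [pvALoop_eq]
  have hm : (if line' < ((0:Nat) : Int) then lines.length else min (line' - ((0:Nat):Int)).toNat lines.length) = k := by
    by_cases h0 : 0 ≤ line' ∧ line' < (lines.length : Int)
    · rw [hk, if_pos h0, if_neg (by omega)]; omega
    · rw [hk, if_neg h0]
      by_cases h1 : line' < 0
      · rw [if_pos (by omega)]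
      · rw [if_neg (by omega)]; omega
  rw [hm]
  rw [PySem.List.slice_to lines (by positivity)]
  by_cases hk0 : k = 0
  · simp [hk0, pvC_nil]
  · rw [if_pos hk0]
    have hkle : k ≤ lines.length := by
      rw [hk]; split
      · omega
      · omega
    have hne : lines.take k ≠ [] := by
      intro hEq
      rcases List.take_eq_nil_iff.mp hEq with h | h <;>
        first
          | exact hk0 h
          | (rw [h] at hkle; simp at hkle; exact hk0 hkle)
    have hsimp : ((k:Int)).toNat = k := by omega
    rw [hsimp, pvJoin_len _ hne]
    ring
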